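-- pv_equiv track=rewrite | github.com/tyki6/rawsec_cli | rawsec_cli/filter.py | filter_projects
-- ===== SOURCE A (Python) =====
-- from typing import Dict
-- from typing import List
--
-- def filter_projects(
--     projects: List,
--     lang=None,
--     paid=False,
--     free=False,
--     online=False,
--     offline=False,
--     blackarch=False,
-- ) -> List[Dict]:
--     """
--     Filter method.
--     Parameters
--     ----------
--     projects: List
--         project List.
--     lang: str, optional
--         Language name.
--     paid: bool, optional
--         paid or not.
--     free: bool, optional
--         free or not.
--     online: bool, optional
--         online or not.
--     offline: bool, optional
--         offline or not.
--     blackarch: bool, optional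
--         present on blackarch.
--
--     Returns
--     -------
--     List[Dict]
--         project filter
--     """
--     if lang is not None and lang != "":
--         projects = [
--             project
--             for project in projects
--             if "language" in project
--             and not lang.lower() != project["language"].lower()
--         ]
--
--     if paid:
--         projects = [
--             project
--             for project in projects
--             if "price" in project and project["price"] != "Free"
--         ]
--
--     if free:
--         projects = [
--             project
--             for project in projects
--             if "price" in project and project["price"] == "Free"
--         ]
--
--     if online:
--         projects = [
--             project
--             for project in projects
--             if "online" in project and project["online"] != "False"
--         ]
--
--     if offline:
--         projects = [
--             project
--             for project in projects
--             if "online" in project and project["online"] == "False"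
--         ]
--
--     if blackarch:
--         projects = [
--             project
--             for project in projects
--             if "blackarch" in project and project["blackarch"] != ""
--         ]
--
--     return projects
-- ===== SOURCE B (Python) =====
-- def filter_projects(
--     projects,
--     lang=None,
--     paid=False,
--     free=False,
--     online=False,
--     offline=False,
--     blackarch=False,
-- ):
--     """Single-pass filter: evaluate all active conditions per project."""
--     use_lang = lang is not None and lang != ""
--
--     def keep(project):
--         if use_lang and not (
--             "language" in project
--             and lang.lower() == project["language"].lower()
--         ):
--             return False
--         if paid and not ("price" in project and project["price"] != "Free"):
--             return False
--         if free and not ("price" in project and project["price"] == "Free"):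
--             return False
--         if online and not ("online" in project and project["online"] != "False"):
--             return False
--         if offline and not ("online" in project and project["online"] == "False"):
--             return False
--         if blackarch and not ("blackarch" in project and project["blackarch"] != ""):
--             return False
--         return True
--
--     return [project for project in projects if keep(project)]
-- ===== Notes on version B (the rewrite author's own statement) =====
-- stated objective: simpler
-- what changed: Replaced the six sequential filtering list comprehensions (each rebuilding the list) with one pass over projects using a single keep() predicate that evaluates only the active filters.
import Mathlib
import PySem

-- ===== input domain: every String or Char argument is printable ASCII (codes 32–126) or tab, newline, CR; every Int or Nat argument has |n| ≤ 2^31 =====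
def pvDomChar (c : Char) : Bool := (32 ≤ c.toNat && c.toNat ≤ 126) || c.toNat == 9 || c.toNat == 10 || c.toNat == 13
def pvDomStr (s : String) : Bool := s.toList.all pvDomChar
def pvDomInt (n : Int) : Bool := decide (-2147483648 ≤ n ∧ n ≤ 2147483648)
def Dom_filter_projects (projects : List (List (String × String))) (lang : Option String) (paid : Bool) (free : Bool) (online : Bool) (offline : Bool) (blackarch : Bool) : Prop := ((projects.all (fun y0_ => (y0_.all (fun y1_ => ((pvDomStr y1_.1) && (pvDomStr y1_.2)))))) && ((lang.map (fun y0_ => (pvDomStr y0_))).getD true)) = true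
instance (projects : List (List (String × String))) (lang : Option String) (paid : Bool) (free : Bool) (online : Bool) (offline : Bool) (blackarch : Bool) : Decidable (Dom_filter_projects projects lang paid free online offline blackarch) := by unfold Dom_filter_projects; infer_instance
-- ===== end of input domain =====

-- B replaces A's six sequential filtering comprehensions with one pass using a
-- single keep predicate that evaluates only the active filters (objective: simpler).

-- first-match association-list lookup: Python's project["k"] / '"k" in project'
def pvLookup (project : List (String × String)) (k : String) : Option String :=
  (project.find? (fun p => p.1 == k)).map (·.2)

-- ===== PORT A =====
def filter_projects (projects : List (List (String × String))) (lang : Option String) (paid : Bool) (free : Bool) (online : Bool) (offline : Bool) (blackarch : Bool) : List (List (String × String)) :=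
  let ps1 :=
    match lang with
    | none => projects
    | some l =>
      if l == "" then projects
      else projects.filter (fun project =>
        match pvLookup project "language" with
        | some v => !(PySem.Str.lower l != PySem.Str.lower v)
        | none => false)
  let ps2 :=
    if paid then ps1.filter (fun project =>
      match pvLookup project "price" with
      | some v => v != "Free"
      | none => false)
    else ps1
  let ps3 :=
    if free then ps2.filter (fun project =>
      match pvLookup project "price" with
      | some v => v == "Free"
      | none => false)
    else ps2
  let ps4 :=
    if online then ps3.filter (fun project =>
      match pvLookup project "online" with
      | some v => v != "False"
      | none => false)
    else ps3
  let ps5 :=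
    if offline then ps4.filter (fun project =>
      match pvLookup project "online" with
      | some v => v == "False"
      | none => false)
    else ps4
  let ps6 :=
    if blackarch then ps5.filter (fun project =>
      match pvLookup project "blackarch" with
      | some v => v != ""
      | none => false)
    else ps5
  ps6

-- ===== PORT B =====
-- B's keep predicate: every active filter must pass
def pvKeep (lang : Option String) (paid free online offline blackarch : Bool)
    (project : List (String × String)) : Bool :=
  let useLang := match lang with | none => false | some l => l != ""
  if useLang && !(match lang with
      | some l =>
        (match pvLookup project "language" with
         | some v => PySem.Str.lower l == PySem.Str.lower v
         | none => false)
      | none => false) then false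
  else if paid && !(match pvLookup project "price" with
      | some v => v != "Free" | none => false) then false
  else if free && !(match pvLookup project "price" with
      | some v => v == "Free" | none => false) then false
  else if online && !(match pvLookup project "online" with
      | some v => v != "False" | none => false) then false
  else if offline && !(match pvLookup project "online" with
      | some v => v == "False" | none => false) then false
  else if blackarch && !(match pvLookup project "blackarch" with
      | some v => v != "" | none => false) then false
  else true

def filter_projects_alt (projects : List (List (String × String))) (lang : Option String) (paid : Bool) (free : Bool) (online : Bool) (offline : Bool) (blackarch : Bool) : List (List (String × String)) :=
  projects.filter (pvKeep lang paid free online offline blackarch)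

-- ===== PRECONDITION & SPEC =====
def Spec_filter_projects (projects : List (List (String × String))) (lang : Option String) (paid : Bool) (free : Bool) (online : Bool) (offline : Bool) (blackarch : Bool) (out : List (List (String × String))) : Prop := out = filter_projects_alt projects lang paid free online offline blackarch
instance (projects : List (List (String × String))) (lang : Option String) (paid : Bool) (free : Bool) (online : Bool) (offline : Bool) (blackarch : Bool) (out : List (List (String × String))) : Decidable (Spec_filter_projects projects lang paid free online offline blackarch out) := by unfold Spec_filter_projects; infer_instance

-- ===== CLAIM (what is proved, stated in full; the proofs are below) =====
def Claim_equal_filter_projects : Prop := ∀ (projects : List (List (String × String))) (lang : Option String) (paid : Bool) (free : Bool) (online : Bool) (offline : Bool) (blackarch : Bool), Dom_filter_projects projects lang paid free online offline blackarch → Spec_filter_projects projects lang paid free online offline blackarch (filter_projects projects lang paid free online offline blackarch)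

-- ===== LEMMAS AND PROOFS =====

-- guarded filter step as a single filter
theorem pv_if_filter {α : Type} (c : Bool) (p : α → Bool) (xs : List α) :
    (if c then xs.filter p else xs) = xs.filter (fun x => !c || p x) := by
  cases c <;> simp

-- pointwise agreement of A's conjoined predicate with B's pvKeep
theorem pv_keep_eq (lang : Option String) (paid free online offline blackarch : Bool)
    (x : List (String × String)) :
    (((((((match lang with
        | none => true
        | some l => (l == "") || (match pvLookup x "language" with | some v => !(PySem.Str.lower l != PySem.Str.lower v) | none => false)) &&
      (!paid || (match pvLookup x "price" with | some v => v != "Free" | none => false))) &&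
      (!free || (match pvLookup x "price" with | some v => v == "Free" | none => false))) &&
      (!online || (match pvLookup x "online" with | some v => v != "False" | none => false))) &&
      (!offline || (match pvLookup x "online" with | some v => v == "False" | none => false))) &&
      (!blackarch || (match pvLookup x "blackarch" with | some v => v != "" | none => false)))) =
    pvKeep lang paid free online offline blackarch x := by
  unfold pvKeep
  cases lang with
  | none =>
    cases hp : pvLookup x "price" <;> cases ho : pvLookup x "online" <;>
      cases hb : pvLookup x "blackarch" <;>
      simp only [hp, ho, hb, bne] <;>
      (apply Bool.eq_iff_iff.mpr; constructor <;> (intro h; simp_all <;> tauto))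
  | some l =>
    cases hl : pvLookup x "language" <;> cases hp : pvLookup x "price" <;>
      cases ho : pvLookup x "online" <;> cases hb : pvLookup x "blackarch" <;>
      simp only [hl, hp, ho, hb, bne] <;>
      (apply Bool.eq_iff_iff.mpr; constructor <;> (intro h; simp_all <;> tauto))

theorem filter_projects_spec : Claim_equal_filter_projects := by
  intro projects lang paid free online offline blackarch _
  unfold Spec_filter_projects filter_projects filter_projects_alt
  dsimp only
  cases lang with
  | none =>
    rw [pv_if_filter, pv_if_filter, pv_if_filter, pv_if_filter, pv_if_filter]
    simp only [List.filter_filter]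
    refine (List.filter_congr ?_).symm
    intro x _
    rw [← pv_keep_eq none paid free online offline blackarch x]
    simp only [Bool.true_and]
    ac_rfl
  | some l =>
    by_cases h : l == ""
    · simp only [h, if_true]
      rw [pv_if_filter, pv_if_filter, pv_if_filter, pv_if_filter, pv_if_filter]
      simp only [List.filter_filter]
      refine (List.filter_congr ?_).symm
      intro x _
      rw [← pv_keep_eq (some l) paid free online offline blackarch x]
      simp only [h, Bool.true_or, Bool.true_and]
      ac_rfl
    · simp only [Bool.not_eq_true] at h
      simp only [h, Bool.false_eq_true, if_false]
      rw [pv_if_filter, pv_if_filter, pv_if_filter, pv_if_filter,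
        pv_if_filter]
      simp only [List.filter_filter]
      refine (List.filter_congr ?_).symm
      intro x _
      rw [← pv_keep_eq (some l) paid free online offline blackarch x]
      simp only [h, Bool.false_or]
      ac_rfl
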